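-- pv_equiv track=rewrite | github.com/anon8274/paisf | run_booksim.py | check_cdg
-- ===== SOURCE A (Python) =====
-- def check_cdg(out_string : str) -> str:
--     lines = out_string.split('\n')
--     cdg_check = "unknown"
--     for line in lines:
--         if "CDG CHECK" in line:
--             cdg_check = line
--             break
--     return cdg_check
-- ===== SOURCE B (Python) =====
-- def check_cdg(out_string: str) -> str:
--     idx = out_string.find("CDG CHECK")
--     if idx == -1:
--         return "unknown"
--     # the enclosing line: tail of the text before the match, head of the text from it on
--     return out_string[:idx].split('\n')[-1] + out_string[idx:].split('\n')[0]
-- ===== Notes on version B (the rewrite author's own statement) =====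
-- stated objective: alternative
-- what changed: B locates the first occurrence of 'CDG CHECK' with str.find and reconstructs only the enclosing line from the two slice boundaries, instead of materializing the full list of lines and scanning it.
import Mathlib
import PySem

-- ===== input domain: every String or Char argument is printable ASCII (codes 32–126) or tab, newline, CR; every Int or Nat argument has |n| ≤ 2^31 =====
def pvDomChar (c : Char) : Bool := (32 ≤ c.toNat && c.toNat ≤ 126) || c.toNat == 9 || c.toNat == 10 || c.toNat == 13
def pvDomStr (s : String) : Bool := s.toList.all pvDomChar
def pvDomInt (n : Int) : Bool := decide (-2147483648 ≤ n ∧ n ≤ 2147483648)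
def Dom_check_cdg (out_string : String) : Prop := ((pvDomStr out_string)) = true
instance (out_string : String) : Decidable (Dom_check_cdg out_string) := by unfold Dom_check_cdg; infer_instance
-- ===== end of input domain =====

-- B finds the first occurrence of "CDG CHECK" directly and reconstructs the enclosing
-- line from the two slice boundaries, instead of splitting into lines and scanning.


-- ===== PORT A =====
-- the 'for line in lines: … break' loop of A, as structural recursion
def check_cdg_loop : List String → String
  | [] => "unknown"
  | line :: rest => if PySem.Str.isIn "CDG CHECK" line then line else check_cdg_loop rest

def check_cdg (out_string : String) : String :=
  check_cdg_loop ((PySem.Str.split? out_string "\n").getD [])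

-- ===== PORT B =====
-- str.split never returns an empty list, so Python's [-1] / [0] indexings never raise;
-- String.ofList (… ++ …) is the exact port of Python's 'head + tail'
def check_cdg_alt (out_string : String) : String :=
  let idx := PySem.Str.find out_string "CDG CHECK"
  if idx = -1 then "unknown"
  else
    let head := ((PySem.List.pyGet? ((PySem.Str.split? (PySem.Str.slice out_string none (some idx)) "\n").getD []) (-1)).getD "")
    let tail := ((PySem.List.pyGet? ((PySem.Str.split? (PySem.Str.slice out_string (some idx) none) "\n").getD []) 0).getD "")
    String.ofList (head.toList ++ tail.toList)

-- ===== PRECONDITION & SPEC =====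
def Spec_check_cdg (out_string : String) (out : String) : Prop := out = check_cdg_alt out_string
instance (out_string : String) (out : String) : Decidable (Spec_check_cdg out_string out) := by unfold Spec_check_cdg; infer_instance

-- ===== CLAIM (what is proved, stated in full; the proofs are below) =====
def Claim_equal_check_cdg : Prop := ∀ (out_string : String), Dom_check_cdg out_string → Spec_check_cdg out_string (check_cdg out_string)

-- ===== LEMMAS AND PROOFS =====
def linesP : List Char → List Char × List (List Char)
  | [] => ([], [])
  | c :: t =>
    let p := linesP t
    if c = '\n' then ([], p.1 :: p.2) else (c :: p.1, p.2)

lemma splitOn_go_eq (l : List Char) : ∀ (fuel : Nat) (cur : List Char) (acc : List (List Char)),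
    l.length < fuel →
    PySem.Chars.splitOn.go ['\n'] fuel l cur acc
      = acc.reverse ++ (cur.reverse ++ (linesP l).1) :: (linesP l).2 := by
  induction l with
  | nil =>
    intro fuel cur acc h
    obtain ⟨f, rfl⟩ : ∃ f, fuel = f + 1 := ⟨fuel - 1, by omega⟩
    rw [PySem.Chars.splitOn.go.eq_def]; simp [linesP]
  | cons c t ih =>
    intro fuel cur acc h
    obtain ⟨f, rfl⟩ : ∃ f, fuel = f + 1 := ⟨fuel - 1, by omega⟩
    · rw [PySem.Chars.splitOn.go.eq_def]
      by_cases hc : c = '\n'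
      · subst hc
        simp only [List.isPrefixOf]
        norm_num
        rw [ih f [] (cur.reverse :: acc) (by rw [List.length_cons] at h; omega)]
        simp [linesP]
      · have : (['\n'].isPrefixOf (c :: t)) = false := by
          simp [List.isPrefixOf]; exact fun hh => (hc hh.symm).elim
        simp only [this]
        norm_num
        rw [ih f (c :: cur) acc (by rw [List.length_cons] at h; omega)]
        simp [linesP, hc]

lemma splitOn_eq (cs : List Char) :
    PySem.Chars.splitOn cs ['\n'] = (linesP cs).1 :: (linesP cs).2 := by
  rw [PySem.Chars.splitOn, splitOn_go_eq cs (cs.length + 1) [] [] (by omega)]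
  simp

lemma linesP_no_nl {cs : List Char} (h : '\n' ∉ cs) : linesP cs = (cs, []) := by
  induction cs with
  | nil => rfl
  | cons c t ih =>
    simp only [List.mem_cons, not_or] at h
    simp [linesP, ih h.2, Ne.symm h.1]

lemma linesP_append {a : List Char} (b : List Char) (h : '\n' ∉ a) :
    linesP (a ++ '\n' :: b) = (a, (linesP b).1 :: (linesP b).2) := by
  induction a with
  | nil => simp [linesP]
  | cons c t ih =>
    simp only [List.mem_cons, not_or] at h
    simp [linesP, ih h.2, Ne.symm h.1]

lemma decompC (cs : List Char) : '\n' ∉ cs ∨ ∃ a b, cs = a ++ '\n' :: b ∧ '\n' ∉ a := by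
  induction cs with
  | nil => left; simp
  | cons c t ih =>
    by_cases hc : c = '\n'
    · right; exact ⟨[], t, by simp [hc], by simp⟩
    · rcases ih with h | ⟨a, b, rfl, ha⟩
      · left; simp only [List.mem_cons, not_or]; exact ⟨Ne.symm hc, h⟩
      · right; exact ⟨c :: a, b, rfl, by simp only [List.mem_cons, not_or]; exact ⟨Ne.symm hc, ha⟩⟩

lemma prefix_split {sub u y : List Char} (hnl : '\n' ∉ sub)
    (h : sub <+: u ++ '\n' :: y) : sub <+: u := by
  by_cases hlen : sub.length ≤ u.length
  · rw [List.prefix_iff_eq_take] at h ⊢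
    rw [h, List.take_append_of_le_length hlen]
    simp [List.length_take]
  · exfalso
    apply hnl
    rw [List.prefix_iff_eq_take] at h
    rw [h]
    have : (u ++ '\n' :: y).take sub.length = u ++ ('\n' :: y).take (sub.length - u.length) := by
      rw [List.take_append, List.take_of_length_le (by omega)]
    rw [this]
    have : sub.length - u.length ≠ 0 := by omega
    rcases Nat.exists_eq_succ_of_ne_zero this with ⟨k, hk⟩
    rw [hk]
    simp

lemma find_eq_of {cs sub : List Char} (i : Nat) (h1 : sub <+: cs.drop i)
    (h2 : ∀ j < i, ¬ sub <+: cs.drop j) : PySem.Chars.find cs sub = i := by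
  have hin : sub <:+: cs := h1.isInfix.trans (List.drop_suffix i cs).isInfix
  have h0 : 0 ≤ PySem.Chars.find cs sub := (PySem.Chars.find_nonneg_iff cs sub).mpr hin
  obtain ⟨hs1, hs2⟩ := PySem.Chars.find_spec h0
  rcases lt_trichotomy (PySem.Chars.find cs sub).toNat i with hlt | heq | hgt
  · exact absurd hs1 (h2 _ hlt)
  · omega
  · exact absurd h1 (hs2 i hgt)

def subC : List Char := "CDG CHECK".toList
def splitOnC (cs : List Char) : List (List Char) := (linesP cs).1 :: (linesP cs).2
def loopC : List (List Char) → List Char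
  | [] => "unknown".toList
  | l :: r => if PySem.Chars.isIn subC l then l else loopC r
def bChars (cs : List Char) : List Char :=
  let idx := PySem.Chars.find cs subC
  if idx = -1 then "unknown".toList
  else ((splitOnC (cs.take idx.toNat)).getLast?.getD [])
       ++ ((splitOnC (cs.drop idx.toNat)).head?.getD [])

lemma nl_not_mem_subC : ('\n' : Char) ∉ subC := by decide

lemma splitOnC_no_nl {cs : List Char} (h : '\n' ∉ cs) : splitOnC cs = [cs] := by
  unfold splitOnC; rw [linesP_no_nl h]

lemma splitOnC_append {a : List Char} (b : List Char) (h : '\n' ∉ a) :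
    splitOnC (a ++ '\n' :: b) = a :: splitOnC b := by
  unfold splitOnC; rw [linesP_append b h]

lemma infix_of_prefix_drop {sub cs : List Char} {j : Nat} (h : sub <+: cs.drop j) :
    sub <:+: cs := h.isInfix.trans (List.drop_suffix j cs).isInfix

-- no occurrence straddles the separator: an occurrence in a line stays in that line
lemma prefix_drop_split {sub a b : List Char} {j : Nat} (hnl : '\n' ∉ sub)
    (hj : j ≤ a.length) (h : sub <+: (a ++ '\n' :: b).drop j) : sub <+: a.drop j := by
  rw [List.drop_append_of_le_length hj] at h
  exact prefix_split hnl h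

lemma find_case1 {a : List Char} (b : List Char) (hinf : subC <:+: a) :
    PySem.Chars.find (a ++ '\n' :: b) subC = PySem.Chars.find a subC := by
  have h0 : 0 ≤ PySem.Chars.find a subC := (PySem.Chars.find_nonneg_iff a subC).mpr hinf
  obtain ⟨hs1, hs2⟩ := PySem.Chars.find_spec h0
  have hle : PySem.Chars.find a subC ≤ a.length := PySem.Chars.find_le_length a subC
  have := find_eq_of (cs := a ++ '\n' :: b) (sub := subC) (PySem.Chars.find a subC).toNat
    (by rw [List.drop_append_of_le_length (by omega)]
        exact hs1.trans (List.prefix_append _ _))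
    (by intro j hj hpre
        exact hs2 j hj (prefix_drop_split nl_not_mem_subC (by omega) hpre))
  omega

lemma find_case2a {a : List Char} {b : List Char} (hna : ¬ subC <:+: a)
    (hb : PySem.Chars.find b subC = -1) :
    PySem.Chars.find (a ++ '\n' :: b) subC = -1 := by
  rw [PySem.Chars.find_eq_neg_one_iff]
  intro hinf
  have : PySem.Chars.isIn subC (a ++ '\n' :: b) = true := by
    rw [PySem.Chars.isIn_iff_infix]; exact hinf
  obtain ⟨j, hj⟩ := (PySem.Chars.exists_prefix_drop_iff_isIn subC (a ++ '\n' :: b)).mpr this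
  by_cases hja : j ≤ a.length
  · exact hna (infix_of_prefix_drop (prefix_drop_split nl_not_mem_subC hja hj))
  · rw [List.drop_append] at hj
    have h1 : a.drop j = [] := by simp; omega
    rw [h1, List.nil_append] at hj
    obtain ⟨k, hk⟩ : ∃ k, j - a.length = k + 1 := ⟨j - a.length - 1, by omega⟩
    rw [hk, List.drop_succ_cons] at hj
    exact (PySem.Chars.find_eq_neg_one_iff b subC).mp hb (infix_of_prefix_drop hj)

lemma find_case2b {a b : List Char} (hna : ¬ subC <:+: a)
    (hb : PySem.Chars.find b subC ≠ -1) :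
    PySem.Chars.find (a ++ '\n' :: b) subC
      = (a.length : Int) + 1 + PySem.Chars.find b subC := by
  have h0 : 0 ≤ PySem.Chars.find b subC := by
    have := PySem.Chars.neg_one_le_find b subC; omega
  obtain ⟨hs1, hs2⟩ := PySem.Chars.find_spec h0
  have := find_eq_of (cs := a ++ '\n' :: b) (sub := subC)
    (a.length + 1 + (PySem.Chars.find b subC).toNat)
    (by rw [List.drop_append]
        have h1 : a.drop (a.length + 1 + (PySem.Chars.find b subC).toNat) = [] := by
          simp; omega
        rw [h1, List.nil_append]
        have h2 : a.length + 1 + (PySem.Chars.find b subC).toNat - a.length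
            = (PySem.Chars.find b subC).toNat + 1 := by omega
        rw [h2, List.drop_succ_cons]
        exact hs1)
    (by intro j hj hpre
        by_cases hja : j ≤ a.length
        · exact hna (infix_of_prefix_drop (prefix_drop_split nl_not_mem_subC hja hpre))
        · rw [List.drop_append] at hpre
          have h1 : a.drop j = [] := by simp; omega
          rw [h1, List.nil_append] at hpre
          obtain ⟨k, hk⟩ : ∃ k, j - a.length = k + 1 ∧ k < (PySem.Chars.find b subC).toNat :=
            ⟨j - a.length - 1, by omega, by omega⟩
          rw [hk.1, List.drop_succ_cons] at hpre
          exact hs2 k hk.2 hpre)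
  omega

lemma bChars_no_nl {cs : List Char} (h : '\n' ∉ cs) :
    bChars cs = (if PySem.Chars.isIn subC cs then cs else "unknown".toList) := by
  unfold bChars
  by_cases hf : PySem.Chars.find cs subC = -1
  · have : PySem.Chars.isIn subC cs = false :=
      (PySem.Chars.isIn_eq_false_iff subC cs).mpr ((PySem.Chars.find_eq_neg_one_iff cs subC).mp hf)
    simp [hf, this]
  · have hinf : subC <:+: cs := (PySem.Chars.find_ne_neg_one_iff cs subC).mp hf
    have hisin : PySem.Chars.isIn subC cs = true := by
      rw [PySem.Chars.isIn_iff_infix]; exact hinf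
    rw [if_neg hf, hisin, if_pos rfl]
    rw [splitOnC_no_nl (fun hm => h (List.mem_of_mem_take hm)),
        splitOnC_no_nl (fun hm => h (List.mem_of_mem_drop hm))]
    simp [List.take_append_drop]

lemma bChars_case1 {a : List Char} (b : List Char) (ha : '\n' ∉ a)
    (hA : PySem.Chars.isIn subC a = true) : bChars (a ++ '\n' :: b) = a := by
  have hinf : subC <:+: a := (PySem.Chars.isIn_iff_infix subC a).mp hA
  have h0 : 0 ≤ PySem.Chars.find a subC := (PySem.Chars.find_nonneg_iff a subC).mpr hinf
  have hle : PySem.Chars.find a subC ≤ a.length := PySem.Chars.find_le_length a subC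
  unfold bChars
  rw [find_case1 b hinf, if_neg (by omega)]
  rw [List.take_append_of_le_length (by omega), List.drop_append_of_le_length (by omega)]
  rw [splitOnC_no_nl (fun hm => ha (List.mem_of_mem_take hm)),
      splitOnC_append b (fun hm => ha (List.mem_of_mem_drop hm))]
  simp [splitOnC, List.take_append_drop]

lemma bChars_skip {a : List Char} (b : List Char) (ha : '\n' ∉ a)
    (hna : ¬ subC <:+: a) : bChars (a ++ '\n' :: b) = bChars b := by
  by_cases hb : PySem.Chars.find b subC = -1
  · unfold bChars
    rw [find_case2a hna hb, hb]
    simp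
  · have h0 : 0 ≤ PySem.Chars.find b subC := by
      have := PySem.Chars.neg_one_le_find b subC; omega
    unfold bChars
    rw [find_case2b hna hb, if_neg (by omega), if_neg hb]
    have htn : ((a.length : Int) + 1 + PySem.Chars.find b subC).toNat
        = a.length + 1 + (PySem.Chars.find b subC).toNat := by omega
    rw [htn]
    have htake : (a ++ '\n' :: b).take (a.length + 1 + (PySem.Chars.find b subC).toNat)
        = a ++ '\n' :: b.take (PySem.Chars.find b subC).toNat := by
      rw [List.take_append]
      congr 1
      · rw [List.take_of_length_le (by omega)]
      · have : a.length + 1 + (PySem.Chars.find b subC).toNat - a.length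
            = (PySem.Chars.find b subC).toNat + 1 := by omega
        rw [this, List.take_succ_cons]
    have hdrop : (a ++ '\n' :: b).drop (a.length + 1 + (PySem.Chars.find b subC).toNat)
        = b.drop (PySem.Chars.find b subC).toNat := by
      rw [List.drop_append]
      have h1 : a.drop (a.length + 1 + (PySem.Chars.find b subC).toNat) = [] := by simp; omega
      have h2 : a.length + 1 + (PySem.Chars.find b subC).toNat - a.length
          = (PySem.Chars.find b subC).toNat + 1 := by omega
      rw [h1, h2, List.nil_append, List.drop_succ_cons]
    rw [htake, hdrop, splitOnC_append _ ha]
    rw [splitOnC]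
    rw [List.getLast?_cons_cons]

lemma mainAux : ∀ (n : Nat) (cs : List Char), cs.length ≤ n →
    loopC (splitOnC cs) = bChars cs := by
  intro n
  induction n with
  | zero =>
    intro cs h
    have hcs : cs = [] := by cases cs with
      | nil => rfl
      | cons c t => simp at h
    subst hcs
    rw [splitOnC_no_nl (by simp), bChars_no_nl (by simp)]
    rfl
  | succ n ih =>
    intro cs hlen
    rcases decompC cs with h | ⟨a, b, rfl, ha⟩
    · rw [splitOnC_no_nl h, bChars_no_nl h]
      rfl
    · rw [splitOnC_append b ha]
      by_cases hA : PySem.Chars.isIn subC a = true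
      · rw [bChars_case1 b ha hA]
        simp [loopC, hA]
      · have hAf : PySem.Chars.isIn subC a = false := by
          cases hq : PySem.Chars.isIn subC a
          · rfl
          · exact absurd hq hA
        have hna : ¬ subC <:+: a := (PySem.Chars.isIn_eq_false_iff subC a).mp hAf
        rw [bChars_skip b ha hna]
        have : loopC (a :: splitOnC b) = loopC (splitOnC b) := by simp [loopC, hAf]
        rw [this]
        exact ih b (by simp at hlen; omega)

lemma split?_eq_some (s : String) :
    PySem.Str.split? s "\n" = some (List.map String.ofList (splitOnC s.toList)) := by
  rw [PySem.Str.split?.eq_1, PySem.Chars.split?.eq_1]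
  have h1 : ("\n".toList : List Char) = ['\n'] := by decide
  rw [h1]
  simp [splitOn_eq, splitOnC]

lemma loop_bridge (L : List (List Char)) :
    check_cdg_loop (L.map String.ofList) = String.ofList (loopC L) := by
  induction L with
  | nil => rfl
  | cons l r ih =>
    simp only [List.map_cons, check_cdg_loop, loopC]
    have : PySem.Str.isIn "CDG CHECK" (String.ofList l) = PySem.Chars.isIn subC l := by
      rw [PySem.Str.isIn_eq]  -- guess name
      simp [subC]
    rw [this]
    by_cases h : PySem.Chars.isIn subC l = true
    · simp [h]
    · simp only [Bool.not_eq_true] at h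
      simp [h, ih]

lemma pyGet?_neg_one {α : Type} (xs : List α) : PySem.List.pyGet? xs (-1) = xs.getLast? := by
  rcases xs with _ | ⟨a, t⟩
  · rfl
  · simp only [PySem.List.pyGet?, PySem.List.pyIdx?]
    norm_num
    rw [List.getLast?_eq_getElem?]
    simp

lemma pyGet?_zero {α : Type} (xs : List α) : PySem.List.pyGet? xs 0 = xs.head? := by
  rcases xs with _ | ⟨a, t⟩
  · rfl
  · simp [PySem.List.pyGet?, PySem.List.pyIdx?]

lemma last_bridge (L : List (List Char)) (hL : L ≠ []) :
    ((PySem.List.pyGet? (L.map String.ofList) (-1)).getD "").toList = L.getLast?.getD [] := by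
  rw [pyGet?_neg_one, List.getLast?_map]
  cases hx : L.getLast? with
  | none => exact absurd (List.getLast?_eq_none_iff.mp hx) hL
  | some x => simp

lemma head_bridge (L : List (List Char)) (hL : L ≠ []) :
    ((PySem.List.pyGet? (L.map String.ofList) 0).getD "").toList = L.head?.getD [] := by
  rw [pyGet?_zero, List.head?_map]
  cases hx : L.head? with
  | none => exact absurd (List.head?_eq_none_iff.mp hx) hL
  | some x => simp

lemma A_bridge (s : String) : check_cdg s = String.ofList (loopC (splitOnC s.toList)) := by
  rw [check_cdg, split?_eq_some]
  simp only [Option.getD_some]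
  exact loop_bridge _

lemma B_bridge (s : String) : check_cdg_alt s = String.ofList (bChars s.toList) := by
  rw [check_cdg_alt, bChars]
  have hfind : PySem.Str.find s "CDG CHECK" = PySem.Chars.find s.toList subC := by
    rw [PySem.Str.find_eq]; rfl
  rw [hfind]
  by_cases hf : PySem.Chars.find s.toList subC = -1
  · simp [hf]
  · have h0 : 0 ≤ PySem.Chars.find s.toList subC := by
      have := PySem.Chars.neg_one_le_find s.toList subC; omega
    rw [if_neg hf]
    have hs1 : (PySem.Str.slice s none (some (PySem.Chars.find s.toList subC))).toList
        = s.toList.take (PySem.Chars.find s.toList subC).toNat := by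
      rw [PySem.Str.toList_slice, PySem.Chars.slice_eq_listSlice, PySem.List.slice_to _ h0]
    have hs2 : (PySem.Str.slice s (some (PySem.Chars.find s.toList subC)) none).toList
        = s.toList.drop (PySem.Chars.find s.toList subC).toNat := by
      rw [PySem.Str.toList_slice, PySem.Chars.slice_eq_listSlice, PySem.List.slice_from _ h0]
    have e1 := split?_eq_some (PySem.Str.slice s none (some (PySem.Chars.find s.toList subC)))
    rw [hs1] at e1
    have e2 := split?_eq_some (PySem.Str.slice s (some (PySem.Chars.find s.toList subC)) none)
    rw [hs2] at e2
    rw [e1, e2]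
    simp only [Option.getD_some]
    rw [last_bridge _ (by simp [splitOnC]), head_bridge _ (by simp [splitOnC])]
    rw [if_neg hf]

-- ===== VERDICT =====
theorem check_cdg_spec : Claim_equal_check_cdg := by
  intro s _
  unfold Spec_check_cdg
  rw [A_bridge, B_bridge, mainAux s.toList.length s.toList le_rfl]
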